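-- pv_equiv track=rewrite | github.com/uchiha-vivek/codeforces-drill | contests/1999/problemB.py | winning_probability
-- ===== SOURCE A (Python) =====
-- from itertools import permutations
--
-- def winning_probability(a1,a2,b1,b2):
--     sunnet_cards = [a1,a2]
--     slavic_cards = [b1,b2]
--     win_count = 0
--     for s_order in permutations(sunnet_cards):
--         for sl_order in permutations(slavic_cards):
--             s_rounds = 0
--             sl_rounds = 0
--             for i in range(2):
--                 if s_order[i]>sl_order[i]:
--                     s_rounds+=1
--                 elif s_order[i]<sl_order[i]:
--                     sl_rounds+=1
--             if s_rounds>sl_rounds: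
--                 win_count+=1
--     return win_count
-- ===== SOURCE B (Python) =====
-- def winning_probability(a1, a2, b1, b2):
--     # Count over the two distinct card pairings; each occurs twice among
--     # the 4 permutation combinations.
--     def wins(x1, y1, x2, y2):
--         s = (x1 > y1) + (x2 > y2)
--         t = (x1 < y1) + (x2 < y2)
--         return 1 if s > t else 0
--     return 2 * (wins(a1, b1, a2, b2) + wins(a1, b2, a2, b1))
-- ===== Notes on version B (the rewrite author's own statement) =====
-- stated objective: simpler
-- what changed: Replaces the nested itertools.permutations enumeration of 4 order combinations with a direct closed-form count over the two distinct card pairings, each weighted by 2.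
import Mathlib
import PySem

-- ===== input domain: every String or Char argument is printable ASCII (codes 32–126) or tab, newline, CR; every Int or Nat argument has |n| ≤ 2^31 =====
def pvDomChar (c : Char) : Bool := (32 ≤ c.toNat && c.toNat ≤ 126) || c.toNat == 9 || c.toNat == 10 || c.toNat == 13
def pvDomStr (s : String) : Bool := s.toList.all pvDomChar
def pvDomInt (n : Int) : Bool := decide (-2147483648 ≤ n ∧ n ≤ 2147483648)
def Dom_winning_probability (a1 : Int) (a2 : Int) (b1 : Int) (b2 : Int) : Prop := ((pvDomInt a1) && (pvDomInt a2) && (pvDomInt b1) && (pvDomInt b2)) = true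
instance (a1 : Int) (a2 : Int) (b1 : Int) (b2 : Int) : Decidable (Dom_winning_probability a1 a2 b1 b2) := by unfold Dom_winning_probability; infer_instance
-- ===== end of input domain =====

-- B replaces the permutation enumeration with a closed-form count over the two distinct pairings (objective: simpler).


-- ===== PORT A =====
-- inner loop over range(2): tally s_rounds/sl_rounds over the two (s_order[i], sl_order[i]) pairs
def pvRounds (so : Int × Int) (slo : Int × Int) : Int × Int :=
  List.foldl
    (fun acc p =>
      if p.1 > p.2 then (acc.1 + 1, acc.2)
      else if p.1 < p.2 then (acc.1, acc.2 + 1)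
      else acc)
    (0, 0) [(so.1, slo.1), (so.2, slo.2)]

def winning_probability (a1 : Int) (a2 : Int) (b1 : Int) (b2 : Int) : Int :=
  -- permutations of the two-card hands, enumerated as in A
  List.foldl
    (fun wc so =>
      List.foldl
        (fun wc slo =>
          let r := pvRounds so slo
          if r.1 > r.2 then wc + 1 else wc)
        wc [(b1, b2), (b2, b1)])
    0 [(a1, a2), (a2, a1)]

-- ===== PORT B =====
def pvWins (x1 : Int) (y1 : Int) (x2 : Int) (y2 : Int) : Int :=
  let s : Int := (if x1 > y1 then 1 else 0) + (if x2 > y2 then 1 else 0)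
  let t : Int := (if x1 < y1 then 1 else 0) + (if x2 < y2 then 1 else 0)
  if s > t then 1 else 0

def winning_probability_alt (a1 : Int) (a2 : Int) (b1 : Int) (b2 : Int) : Int :=
  2 * (pvWins a1 b1 a2 b2 + pvWins a1 b2 a2 b1)

-- ===== PRECONDITION & SPEC =====
def Spec_winning_probability (a1 : Int) (a2 : Int) (b1 : Int) (b2 : Int) (out : Int) : Prop := out = winning_probability_alt a1 a2 b1 b2
instance (a1 : Int) (a2 : Int) (b1 : Int) (b2 : Int) (out : Int) : Decidable (Spec_winning_probability a1 a2 b1 b2 out) := by unfold Spec_winning_probability; infer_instance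

-- ===== CLAIM (what is proved, stated in full; the proofs are below) =====
def Claim_equal_winning_probability : Prop := ∀ (a1 : Int) (a2 : Int) (b1 : Int) (b2 : Int), Dom_winning_probability a1 a2 b1 b2 → Spec_winning_probability a1 a2 b1 b2 (winning_probability a1 a2 b1 b2)

-- ===== LEMMAS AND PROOFS =====

-- ===== VERDICT (by name: the statement is the Claim_ definition above) =====
-- inner-loop characterisation: one permutation combination contributes pvWins to the count
theorem pvStep (wc : Int) (x1 x2 y1 y2 : Int) :
    (if (pvRounds (x1, x2) (y1, y2)).1 > (pvRounds (x1, x2) (y1, y2)).2 then wc + 1 else wc)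
      = wc + pvWins x1 y1 x2 y2 := by
  simp only [pvRounds, pvWins, List.foldl]
  split_ifs <;> omega

theorem pvWins_comm (x1 y1 x2 y2 : Int) : pvWins x1 y1 x2 y2 = pvWins x2 y2 x1 y1 := by
  simp only [pvWins]
  split_ifs <;> omega

theorem winning_probability_spec : Claim_equal_winning_probability := by
  intro a1 a2 b1 b2 _
  unfold Spec_winning_probability winning_probability winning_probability_alt
  simp only [List.foldl, pvStep]
  rw [pvWins_comm a2 b1 a1 b2, pvWins_comm a2 b2 a1 b1]
  ring
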